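-- pv_equiv track=rewrite | github.com/hckkid/RSA-Python | fun_compare.py | islesser
-- ===== SOURCE A (Python) =====
-- def islesser(p,q):
--     flag=False
--     if(len(p)>0):
--         if(len(p)>len(q)):
--             flag=False
--         elif(len(p)<len(q)):
--             flag=True
--         elif(p[len(p)-1]>q[len(q)-1]):
--             flag=False
--         elif(p[len(p)-1]<q[len(q)-1]):
--             flag=True
--         else:
--             flag=islesser(p[0:len(p)-1],q[0:len(q)-1])
--     return flag
-- ===== SOURCE B (Python) =====
-- def islesser(p, q):
--     if not p:
--         return False
--     if len(p) != len(q):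
--         return len(p) < len(q)
--     return p[::-1] < q[::-1]
-- ===== Notes on version B (the rewrite author's own statement) =====
-- stated objective: idiomatic
-- what changed: Replaces A's slice-and-recurse MSD scan (which copies both lists on every step) with guards plus a single delegation to Python's built-in lexicographic comparison of the reversed lists.
import Mathlib
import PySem

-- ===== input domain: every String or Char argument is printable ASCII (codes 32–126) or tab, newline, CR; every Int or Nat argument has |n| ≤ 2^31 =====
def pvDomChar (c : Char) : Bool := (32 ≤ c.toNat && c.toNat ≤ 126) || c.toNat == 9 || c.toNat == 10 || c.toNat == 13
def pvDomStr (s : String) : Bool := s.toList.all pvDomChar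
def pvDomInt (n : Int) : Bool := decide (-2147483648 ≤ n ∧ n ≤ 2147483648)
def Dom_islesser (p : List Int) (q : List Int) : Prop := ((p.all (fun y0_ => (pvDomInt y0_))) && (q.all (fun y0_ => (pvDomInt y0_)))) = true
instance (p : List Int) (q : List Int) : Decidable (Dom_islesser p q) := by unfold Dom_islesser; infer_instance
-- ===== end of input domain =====

-- B replaces A's slice-and-recurse most-significant-digit scan by length guards plus one
-- lexicographic comparison of the reversed lists (Python's built-in list `<`).

-- ===== PORT A =====
-- A's recursion, with an explicit fuel bound (fuel = len(p)+1 always suffices: each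
-- recursive call shortens p by one), so the port is structurally recursive.
def islesserGo : Nat → List Int → List Int → Bool
  | 0, _, _ => false
  | Nat.succ fuel, p, q =>
    if p.length > 0 then
      if p.length > q.length then false
      else if p.length < q.length then true
      else
        -- p[len(p)-1] / q[len(q)-1]: index is always in range here (len > 0)
        let a := (PySem.List.pyGet? p ((p.length : Int) - 1)).getD 0
        let b := (PySem.List.pyGet? q ((q.length : Int) - 1)).getD 0
        if a > b then false
        else if a < b then true
        else islesserGo fuel (PySem.List.slice p (some 0) (some ((p.length : Int) - 1)))
                             (PySem.List.slice q (some 0) (some ((q.length : Int) - 1)))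
    else false

def islesser (p : List Int) (q : List Int) : Bool := islesserGo (p.length + 1) p q

-- ===== PORT B =====
-- Python's built-in lexicographic `<` on int lists, transliterated
def lexLt : List Int → List Int → Bool
  | [], [] => false
  | [], _ :: _ => true
  | _ :: _, [] => false
  | a :: as, b :: bs => if a < b then true else if b < a then false else lexLt as bs

def islesser_alt (p : List Int) (q : List Int) : Bool :=
  if p.length = 0 then false
  else if p.length ≠ q.length then decide (p.length < q.length)
  else lexLt p.reverse q.reverse

-- ===== PRECONDITION & SPEC =====
def Spec_islesser (p : List Int) (q : List Int) (out : Bool) : Prop := out = islesser_alt p q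
instance (p : List Int) (q : List Int) (out : Bool) : Decidable (Spec_islesser p q out) := by unfold Spec_islesser; infer_instance

-- ===== CLAIM (what is proved, stated in full; the proofs are below) =====
def Claim_equal_islesser : Prop := ∀ (p : List Int) (q : List Int), Dom_islesser p q → Spec_islesser p q (islesser p q)

-- ===== LEMMAS AND PROOFS =====

-- one unfolding of A's recursion on "snoc" lists of equal length
theorem islesserGo_snoc (fuel : Nat) (a b : Int) (as bs : List Int) (h : as.length = bs.length) :
    islesserGo (fuel + 1) (as ++ [a]) (bs ++ [b])
      = if a > b then false else if a < b then true else islesserGo fuel as bs := by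
  show (if (as ++ [a]).length > 0 then _ else false) = _
  have hga : PySem.List.pyGet? (as ++ [a]) (((as ++ [a]).length : Int) - 1) = some a := by
    have : ((as ++ [a]).length : Int) - 1 = ((as.length : Nat) : Int) := by simp
    rw [this, PySem.List.pyGet?_natCast]
    simp
  have hgb : PySem.List.pyGet? (bs ++ [b]) (((bs ++ [b]).length : Int) - 1) = some b := by
    have : ((bs ++ [b]).length : Int) - 1 = ((bs.length : Nat) : Int) := by simp
    rw [this, PySem.List.pyGet?_natCast]
    simp
  have hsa : PySem.List.slice (as ++ [a]) (some 0) (some (((as ++ [a]).length : Int) - 1)) = as := by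
    have : ((as ++ [a]).length : Int) - 1 = ((as.length : Nat) : Int) := by simp
    rw [PySem.List.slice_zero_start, this, PySem.List.slice_to_natCast]
    simp
  have hsb : PySem.List.slice (bs ++ [b]) (some 0) (some (((bs ++ [b]).length : Int) - 1)) = bs := by
    have : ((bs ++ [b]).length : Int) - 1 = ((bs.length : Nat) : Int) := by simp
    rw [PySem.List.slice_zero_start, this, PySem.List.slice_to_natCast]
    simp
  rw [hga, hgb, hsa, hsb]
  simp [h]
  all_goals rfl

-- equal-length case: A's recursion (with enough fuel) equals lexLt on the reversed views
theorem islesserGo_rev (pr : List Int) : ∀ (qr : List Int) (fuel : Nat),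
    pr.length < fuel + 1 → qr.length = pr.length →
    islesserGo (fuel + 1) pr.reverse qr.reverse = lexLt pr qr := by
  induction pr with
  | nil =>
    intro qr fuel _ hq
    have : qr = [] := List.length_eq_zero_iff.mp (by simpa using hq)
    subst this
    rfl
  | cons a as ih =>
    intro qr fuel hf hq
    cases qr with
    | nil => simp at hq
    | cons b bs =>
      cases fuel with
      | zero => simp at hf
      | succ f =>
        simp only [List.reverse_cons]
        rw [islesserGo_snoc (f + 1) a b as.reverse bs.reverse (by simp at hq ⊢; omega)]
        rw [ih bs f (by simp at hf; omega) (by simp at hq; omega)]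
        simp only [lexLt]
        rcases lt_trichotomy a b with hlt | heq | hgt
        · simp [hlt, asymm hlt]
        · simp [heq]
        · simp [hgt, asymm hgt]

theorem islesser_eq_alt (p q : List Int) : islesser p q = islesser_alt p q := by
  by_cases hp : p.length = 0
  · have : p = [] := List.length_eq_zero_iff.mp hp
    subst this
    rfl
  · by_cases hlen : p.length = q.length
    · have h := islesserGo_rev p.reverse q.reverse p.length
        (by simp) (by simpa using hlen.symm)
      simp only [List.reverse_reverse] at h
      rw [islesser, h, islesser_alt]
      have hq : q ≠ [] := by
        intro hq0; apply hp; rw [hq0] at hlen; simpa using hlen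
      simp [hlen, hq]
    · rw [islesser, islesserGo, islesser_alt]
      rcases Nat.lt_or_ge p.length q.length with hlt | hge
      · simp [hp, hlen, hlt, Nat.pos_of_ne_zero hp, not_lt.mpr (le_of_lt hlt)]
      · have hgt : q.length < p.length := by omega
        simp [hp, hlen, hgt, Nat.pos_of_ne_zero hp, not_lt.mpr (le_of_lt hgt)]

-- ===== VERDICT (by name: the statement is the Claim_ definition above) =====
theorem islesser_spec : Claim_equal_islesser := by
  intro p q _
  exact islesser_eq_alt p q
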